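-- pv_equiv track=rewrite | github.com/ch1102chiou/CSE1309x_UsingPython | assignment3.py | capitalize_word_in_crossword
-- ===== SOURCE A (Python) =====
-- def find_word_horizontal(crosswords,word):
--     rowIndex = 0
--     for row in crosswords:
--         string = ""
--         # transfer to each row to string
--         for c in row:
--             string = string + c
--         # if string contains a word
--         # return the colume and row index
--         colIndex = string.find(word)
--         if  colIndex != -1:
--             return [rowIndex, colIndex]
--         rowIndex = rowIndex + 1
--     # No match return None
--     return None
--
-- def find_word_vertical(crosswords,word):
--     # Type your code here
--     # Insert from part 1
--     def find_word_horizontal(crosswords,word):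
--         rowIndex = 0
--         for row in crosswords:
--             string = ""
--             # transfer to each row to string
--             for c in row:
--                 string = string + c
--             # if string contains a word
--             # return the colume and row index
--             colIndex = string.find(word)
--             if  colIndex != -1:
--                 return [rowIndex, colIndex]
--             rowIndex = rowIndex + 1
--         # No match return None
--         return None
--
--     # function to caculate matrix transpose
--     def transMatrix(matrix):
--         if len(matrix) <= 0:
--             return None
--         rowSize = len(matrix)
--         colSize = len(matrix[0])
--         # init the matrix_T
--         matrix_T = [[] for i in range(len(matrix[0]))]
--         for i in range (rowSize):
--             for j in range (colSize):
--                 matrix_T[j].append(matrix[i][j])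
--         return matrix_T
--
--     a = find_word_horizontal(transMatrix(crosswords), word)
--     if a is None:
--         return None
--     else:
--         return [a[1], a[0]]
--
-- def capitalize_word_in_crossword(crosswords,word):
--     wordLen = len(word)
--     hori_match = find_word_horizontal(crosswords,word)
--     if hori_match != None:
--         row = hori_match[0]
--         col = hori_match[1]
--         for index in range(wordLen):
--             crosswords[row][col + index] = crosswords[row][col + index].upper()
--     else:
--         verti_match = find_word_vertical(crosswords,word)
--         if verti_match != None:
--             row = verti_match[0]
--             col = verti_match[1]
--             for index in range(wordLen):
--                 crosswords[row + index][col] = crosswords[row + index][col].upper()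
--     return crosswords
-- ===== SOURCE B (Python) =====
-- def capitalize_word_in_crossword(crosswords, word):
--     chars = list(word)
--     n = len(chars)
--     # horizontal pass: positional cell-by-cell matching, top row first
--     for r in range(len(crosswords)):
--         row = crosswords[r]
--         for c in range(len(row) - n + 1):
--             if all(row[c + i] == chars[i] for i in range(n)):
--                 for i in range(n):
--                     crosswords[r][c + i] = crosswords[r][c + i].upper()
--                 return crosswords
--     # vertical pass: leftmost column first, earliest start row
--     cols = len(crosswords[0]) if crosswords else 0
--     for c in range(cols):
--         for r in range(len(crosswords) - n + 1):
--             if all(crosswords[r + i][c] == chars[i] for i in range(n)):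
--                 for i in range(n):
--                     crosswords[r + i][c] = crosswords[r + i][c].upper()
--                 return crosswords
--     return crosswords
-- ===== Notes on version B (the rewrite author's own statement) =====
-- stated objective: simpler
-- what changed: Replaces A's row-joining str.find plus a full matrix transpose with two direct positional passes (row-major horizontal, then column-major vertical) that compare cells against the word's characters in place; no joined strings and no transposed copy are allocated.
-- outside the precondition, e.g. on capitalize_word_in_crossword([['ab', 'cd']], 'b'): A returns [['ab', 'CD']], B returns [['ab', 'cd']]; on capitalize_word_in_crossword([], 'x'): A raises TypeError, B returns []
import Mathlib
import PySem

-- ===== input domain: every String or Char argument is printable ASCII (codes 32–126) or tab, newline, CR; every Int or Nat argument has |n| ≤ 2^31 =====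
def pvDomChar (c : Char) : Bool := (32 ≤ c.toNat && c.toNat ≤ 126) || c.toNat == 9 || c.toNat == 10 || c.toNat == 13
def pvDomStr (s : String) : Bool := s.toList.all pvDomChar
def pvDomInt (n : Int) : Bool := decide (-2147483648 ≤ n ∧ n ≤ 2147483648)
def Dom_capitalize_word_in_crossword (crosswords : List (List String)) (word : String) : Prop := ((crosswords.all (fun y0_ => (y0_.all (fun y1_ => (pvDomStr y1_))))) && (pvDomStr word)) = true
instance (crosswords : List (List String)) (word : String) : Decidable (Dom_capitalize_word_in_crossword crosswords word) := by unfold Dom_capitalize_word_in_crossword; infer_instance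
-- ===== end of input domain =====

-- B replaces A's row-joining str.find plus matrix transpose by two direct positional
-- passes over the cells (objective: simpler).  Both Pythons mutate the grid in place and
-- return the same object; the equivalence proved here is about the returned value.

-- ===== PORT A =====

-- 'string = string + c' row join
def pvRowStr (row : List String) : String := row.foldl (fun s c => s ++ c) ""

-- find_word_horizontal, with the running rowIndex as a parameter
def pvFWH (rows : List (List String)) (word : String) (rowIndex : Int) : Option (Int × Int) :=
  match rows with
  | [] => none
  | row :: rest =>
    let colIndex := PySem.Str.find (pvRowStr row) word
    if colIndex ≠ -1 then some (rowIndex, colIndex)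
    else pvFWH rest word (rowIndex + 1)

-- transMatrix (the nested append loops; out-of-range reads on ragged input use the
-- pyGetD default, which Pre_ excludes)
def pvTransMatrix (m : List (List String)) : Option (List (List String)) :=
  if m.length ≤ 0 then none
  else
    let rowSize := m.length
    let colSize := (PySem.List.pyGetD m 0 []).length
    let init := (List.range colSize).map (fun _ => ([] : List String))
    some ((PySem.List.pyRange 0 (rowSize : Int)).foldl (fun T i =>
      (PySem.List.pyRange 0 (colSize : Int)).foldl (fun T j =>
        PySem.List.pySetD T j (PySem.List.pyGetD T j [] ++
          [PySem.List.pyGetD (PySem.List.pyGetD m i []) j ""])) T) init)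

-- find_word_vertical (on None from transMatrix Python raises TypeError: outside Pre_)
def pvFWV (crosswords : List (List String)) (word : String) : Option (Int × Int) :=
  match pvTransMatrix crosswords with
  | none => none
  | some t =>
    match pvFWH t word 0 with
    | none => none
    | some a => some (a.2, a.1)

-- 'crosswords[row][col+index] = crosswords[row][col+index].upper()' loop (this exact
-- loop occurs verbatim in BOTH Pythons, so both ports share it)
def pvUpperH (g : List (List String)) (row col : Int) (wordLen : Nat) : List (List String) :=
  (PySem.List.pyRange 0 (wordLen : Int)).foldl (fun g idx =>
    PySem.List.pySetD g row (PySem.List.pySetD (PySem.List.pyGetD g row []) (col + idx)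
      (PySem.Str.upper (PySem.List.pyGetD (PySem.List.pyGetD g row []) (col + idx) "")))) g

-- 'crosswords[row+index][col] = crosswords[row+index][col].upper()' loop (same remark)
def pvUpperV (g : List (List String)) (row col : Int) (wordLen : Nat) : List (List String) :=
  (PySem.List.pyRange 0 (wordLen : Int)).foldl (fun g idx =>
    PySem.List.pySetD g (row + idx) (PySem.List.pySetD (PySem.List.pyGetD g (row + idx) []) col
      (PySem.Str.upper (PySem.List.pyGetD (PySem.List.pyGetD g (row + idx) []) col "")))) g

def capitalize_word_in_crossword (crosswords : List (List String)) (word : String) : List (List String) :=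
  let wordLen := (PySem.Str.len word).toNat
  match pvFWH crosswords word 0 with
  | some rc => pvUpperH crosswords rc.1 rc.2 wordLen
  | none =>
    match pvFWV crosswords word with
    | some rc => pvUpperV crosswords rc.1 rc.2 wordLen
    | none => crosswords

-- ===== PORT B =====

-- 'all(row[c + i] == chars[i] for i in range(n))' (a 1-char cell equals the character)
def altMatchH (row : List String) (chars : List Char) (c : Int) : Bool :=
  (PySem.List.pyRange 0 (chars.length : Int)).all (fun i =>
    (PySem.List.pyGetD row (c + i) "").toList = [PySem.List.pyGetD chars i ' '])

-- 'all(crosswords[r + i][c] == chars[i] for i in range(n))'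
def altMatchV (g : List (List String)) (chars : List Char) (r c : Int) : Bool :=
  (PySem.List.pyRange 0 (chars.length : Int)).all (fun i =>
    (PySem.List.pyGetD (PySem.List.pyGetD g (r + i) []) c "").toList = [PySem.List.pyGetD chars i ' '])

-- horizontal pass: first row (top first) with a positional match, first start column
def altFindH (g : List (List String)) (chars : List Char) : Option (Int × Int) :=
  (PySem.List.enumerate g).findSome? (fun rc =>
    ((PySem.List.pyRange 0 ((rc.2.length : Int) - chars.length + 1)).find?
      (fun c => altMatchH rc.2 chars c)).map (fun c => (rc.1, c)))

-- vertical pass: leftmost column first, earliest start row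
def altFindV (g : List (List String)) (chars : List Char) : Option (Int × Int) :=
  let cols : Nat := match g with | [] => 0 | r0 :: _ => r0.length
  (PySem.List.pyRange 0 (cols : Int)).findSome? (fun c =>
    ((PySem.List.pyRange 0 ((g.length : Int) - chars.length + 1)).find?
      (fun r => altMatchV g chars r c)).map (fun r => (r, c)))

def capitalize_word_in_crossword_alt (crosswords : List (List String)) (word : String) : List (List String) :=
  let chars := word.toList
  match altFindH crosswords chars with
  | some rc => pvUpperH crosswords rc.1 rc.2 chars.length
  | none =>
    match altFindV crosswords chars with
    | some rc => pvUpperV crosswords rc.1 rc.2 chars.length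
    | none => crosswords

-- ===== PRECONDITION & SPEC =====
-- Pre_ is the task's natural domain — a NONEMPTY grid that is either made of
-- SINGLE-CHARACTER cells and RECTANGULAR, or on which the word occurs nowhere
-- (horizontally or vertically), plus any nonempty grid for the empty word.  Outside it,
-- A raises TypeError on the empty grid and IndexError on ragged grids, and on
-- multi-character cells containing the word str.find's CHARACTER index is misused as a
-- CELL index, so A uppercases accidental cells (or raises).
def Pre_capitalize_word_in_crossword (crosswords : List (List String)) (word : String) : Prop :=
  (crosswords ≠ [] ∧ word.toList = []) ∨
  (crosswords ≠ [] ∧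
    (∀ row ∈ crosswords, row.length = (crosswords.headD []).length) ∧
    (∀ row ∈ crosswords, ∀ cell ∈ row, cell.toList.length = 1)) ∨
  (crosswords ≠ [] ∧ word.toList ≠ [] ∧
    (∀ row ∈ crosswords, (crosswords.headD []).length ≤ row.length) ∧
    (∀ row ∈ crosswords, ¬ word.toList <:+: row.flatMap String.toList) ∧
    (∀ j : Nat, j < (crosswords.headD []).length →
      ¬ word.toList <:+: (crosswords.map
        (fun row => PySem.List.pyGetD row (j : Int) "")).flatMap String.toList))
instance (crosswords : List (List String)) (word : String) : Decidable (Pre_capitalize_word_in_crossword crosswords word) := by unfold Pre_capitalize_word_in_crossword; infer_instance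

def pvWitness_capitalize_word_in_crossword : List (List String) × String :=
  ([["c", "a", "t"], ["o", "x", "o"], ["g", "o", "d"]], "ox")

def Spec_capitalize_word_in_crossword (crosswords : List (List String)) (word : String) (out : List (List String)) : Prop := out = capitalize_word_in_crossword_alt crosswords word
instance (crosswords : List (List String)) (word : String) (out : List (List String)) : Decidable (Spec_capitalize_word_in_crossword crosswords word out) := by unfold Spec_capitalize_word_in_crossword; infer_instance

-- ===== CLAIM (what is proved, stated in full; the proofs are below) =====
def Claim_equal_capitalize_word_in_crossword : Prop := ∀ (crosswords : List (List String)) (word : String), Dom_capitalize_word_in_crossword crosswords word → Pre_capitalize_word_in_crossword crosswords word → Spec_capitalize_word_in_crossword crosswords word (capitalize_word_in_crossword crosswords word)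

-- ===== LEMMAS AND PROOFS =====

-- chars of a row of 1-char cells
def csOf (row : List String) : List Char := row.flatMap String.toList

theorem toList_pvRowStr (row : List String) : (pvRowStr row).toList = csOf row := by
  unfold pvRowStr csOf
  suffices h : ∀ (row : List String) (s : String),
      (row.foldl (fun s c => s ++ c) s).toList = s.toList ++ row.flatMap String.toList by
    simpa using h row ""
  intro row
  induction row with
  | nil => intro s; simp
  | cons a t ih => intro s; simp [List.foldl_cons, ih, String.toList_append]

theorem length_csOf {row : List String} (h : ∀ cell ∈ row, cell.toList.length = 1) :
    (csOf row).length = row.length := by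
  unfold csOf
  induction row with
  | nil => simp
  | cons a t ih =>
    have ha := h a (by simp)
    simp only [List.flatMap_cons, List.length_append, ha,
      ih (fun cell hc => h cell (by simp [hc])), List.length_cons]
    omega

theorem getElem?_toList_csOf {row : List String} (h : ∀ cell ∈ row, cell.toList.length = 1)
    (k : Nat) : row[k]?.map String.toList = ((csOf row)[k]?).map (fun c => [c]) := by
  induction row generalizing k with
  | nil => simp [csOf]
  | cons a t ih =>
    obtain ⟨c0, hc0⟩ := List.length_eq_one_iff.mp (h a (by simp))
    have hcs : csOf (a :: t) = c0 :: csOf t := by simp [csOf, hc0]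
    cases k with
    | zero => simp [hcs, hc0]
    | succ k => simpa [hcs] using ih (fun cell hc => h cell (by simp [hc])) k

theorem altMatchH_iff {row : List String} (hrow : ∀ cell ∈ row, cell.toList.length = 1)
    (w : List Char) (c : Int) (h0 : 0 ≤ c) (hcl : c.toNat + w.length ≤ row.length) :
    altMatchH row w c = true ↔ w <+: (csOf row).drop c.toNat := by
  have hcs := length_csOf hrow
  unfold altMatchH
  rw [List.all_eq_true, List.prefix_iff_getElem?]
  constructor
  · intro hall i hi
    have hmem : (i : Int) ∈ PySem.List.pyRange 0 (w.length : Int) := by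
      rw [PySem.List.mem_pyRange_one]; omega
    have := hall _ hmem
    simp only [decide_eq_true_eq] at this
    have hci : 0 ≤ c + (i : Int) := by omega
    have hci2 : c + (i : Int) < (row.length : Int) := by omega
    rw [PySem.List.pyGetD_eq_getElem row "" hci hci2,
        PySem.List.pyGetD_eq_getElem w ' ' (by omega) (by omega)] at this
    have htn : (c + (i : Int)).toNat = c.toNat + i := by omega
    have hlt : c.toNat + i < row.length := by omega
    have hq := getElem?_toList_csOf hrow (c.toNat + i)
    rw [List.getElem?_eq_getElem hlt] at hq
    have hlt2 : c.toNat + i < (csOf row).length := by omega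
    rw [List.getElem?_eq_getElem hlt2] at hq
    simp only [Option.map_some, Option.some.injEq] at hq
    simp only [htn, Int.toNat_natCast] at this
    rw [List.getElem?_drop, List.getElem?_eq_getElem hlt2]
    have hfin : (csOf row)[c.toNat + i] = w[i] := by
      have h2 := hq.symm.trans this
      simpa using h2
    rw [hfin]
  · intro hpre x hx
    rw [PySem.List.mem_pyRange_one] at hx
    simp only [decide_eq_true_eq]
    have hxn : x.toNat < w.length := by omega
    have := hpre x.toNat hxn
    rw [List.getElem?_drop, List.getElem?_eq_getElem (by omega : c.toNat + x.toNat < (csOf row).length)] at this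
    have hci : 0 ≤ c + x := by omega
    have hci2 : c + x < (row.length : Int) := by omega
    rw [PySem.List.pyGetD_eq_getElem row "" hci hci2,
        PySem.List.pyGetD_eq_getElem w ' ' hx.1 (by omega)]
    have htn : (c + x).toNat = c.toNat + x.toNat := by omega
    simp only [htn]
    have hq := getElem?_toList_csOf hrow (c.toNat + x.toNat)
    rw [List.getElem?_eq_getElem (by omega : c.toNat + x.toNat < row.length),
        List.getElem?_eq_getElem (by omega : c.toNat + x.toNat < (csOf row).length)] at hq
    simp only [Option.map_some, Option.some.injEq] at hq
    rw [hq]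
    simp only [Option.some.injEq] at this
    rw [this]

theorem find?_pyRange_eq_some {m k : Int} {p : Int → Bool} (h0 : 0 ≤ k) (hk : k < m)
    (hp : p k = true) (hmin : ∀ j, 0 ≤ j → j < k → p j = false) :
    (PySem.List.pyRange 0 m).find? p = some k := by
  rw [PySem.List.pyRange_one_append 0 k m h0 (le_of_lt hk), List.find?_append]
  have h1 : (PySem.List.pyRange 0 k).find? p = none := List.find?_eq_none.mpr (by
    intro x hx
    rw [PySem.List.mem_pyRange_one] at hx
    simp [hmin x hx.1 hx.2])
  rw [h1, PySem.List.pyRange_one_cons hk, List.find?_cons_of_pos hp]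
  rfl

theorem rowFind {row : List String} (hrow : ∀ cell ∈ row, cell.toList.length = 1)
    (w : List Char) :
    (PySem.List.pyRange 0 ((row.length : Int) - w.length + 1)).find? (fun c => altMatchH row w c)
    = (if PySem.Chars.find (csOf row) w = -1 then none
       else some (PySem.Chars.find (csOf row) w)) := by
  have hcs := length_csOf hrow
  by_cases hneg : PySem.Chars.find (csOf row) w = -1
  · rw [if_pos hneg]
    apply List.find?_eq_none.mpr
    intro c hc
    rw [PySem.List.mem_pyRange_one] at hc
    by_contra hC
    have hpre := (altMatchH_iff hrow w c hc.1 (by omega)).mp hC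
    have : w <:+: csOf row := hpre.isInfix.trans (List.drop_suffix c.toNat (csOf row)).isInfix
    exact (PySem.Chars.find_eq_neg_one_iff (csOf row) w).mp hneg this
  · rw [if_neg hneg]
    have hge : 0 ≤ PySem.Chars.find (csOf row) w := by
      have := PySem.Chars.neg_one_le_find (csOf row) w; omega
    obtain ⟨hpre, hmin⟩ := PySem.Chars.find_spec (s := csOf row) (sub := w) hge
    have hle := PySem.Chars.find_le_length (csOf row) w
    have hlen : w.length ≤ (csOf row).length - (PySem.Chars.find (csOf row) w).toNat := by
      have := hpre.length_le
      simpa using this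
    apply find?_pyRange_eq_some hge (by omega)
    · exact (altMatchH_iff hrow w _ hge (by omega)).mpr hpre
    · intro j hj0 hjk
      by_contra hC
      rw [Bool.not_eq_false] at hC
      have hp := (altMatchH_iff hrow w j hj0 (by omega)).mp hC
      exact hmin j.toNat (by omega) hp

theorem fwh_eq (g : List (List String)) (word : String)
    (hcell : ∀ row ∈ g, ∀ cell ∈ row, cell.toList.length = 1) (r : Int) :
    pvFWH g word r = (PySem.List.enumerate g r).findSome? (fun rc =>
      ((PySem.List.pyRange 0 ((rc.2.length : Int) - word.toList.length + 1)).find?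
        (fun c => altMatchH rc.2 word.toList c)).map (fun c => (rc.1, c))) := by
  induction g generalizing r with
  | nil => simp [pvFWH, PySem.List.enumerate_nil]
  | cons row rest ih =>
    rw [PySem.List.enumerate_cons]
    simp only [List.findSome?_cons]
    have hrow : ∀ cell ∈ row, cell.toList.length = 1 := hcell row (by simp)
    have hfind : PySem.Str.find (pvRowStr row) word = PySem.Chars.find (csOf row) word.toList := by
      rw [PySem.Str.find_eq, toList_pvRowStr]
    have hrw := rowFind hrow word.toList
    show (if PySem.Str.find (pvRowStr row) word ≠ -1
          then some (r, PySem.Str.find (pvRowStr row) word)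
          else pvFWH rest word (r + 1)) = _
    rw [hfind]
    by_cases hneg : PySem.Chars.find (csOf row) word.toList = -1
    · rw [if_pos hneg] at hrw
      rw [if_neg (by simp [hneg]), hrw]
      simp only [Option.map_none]
      exact ih (fun r hr => hcell r (by simp [hr])) (r + 1)
    · rw [if_neg hneg] at hrw
      rw [if_pos hneg, hrw]
      rfl

theorem foldl_pySetD_len {α β : Type} (l : List β) (idx : List α → β → Int)
    (v : List α → β → α) (T : List α) :
    (l.foldl (fun T b => PySem.List.pySetD T (idx T b) (v T b)) T).length = T.length := by
  induction l generalizing T with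
  | nil => rfl
  | cons b t ih => rw [List.foldl_cons, ih, PySem.List.length_pySetD]

theorem inner_getD (row : List String) (m : Nat) (T : List (List String)) (hmT : m ≤ T.length)
    (q : Nat) :
    PySem.List.pyGetD ((PySem.List.pyRange 0 (m : Int)).foldl
      (fun T' j => PySem.List.pySetD T' j (PySem.List.pyGetD T' j [] ++
        [PySem.List.pyGetD row j ""])) T) (q : Int) []
    = if q < m then PySem.List.pyGetD T (q : Int) [] ++ [PySem.List.pyGetD row (q : Int) ""]
      else PySem.List.pyGetD T (q : Int) [] := by
  induction m with
  | zero => simp [PySem.List.pyRange_one_eq_nil]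
  | succ m ih =>
    have hcast : ((m + 1 : Nat) : Int) = (m : Int) + 1 := by push_cast; ring
    rw [hcast, PySem.List.pyRange_one_succ_right (by positivity), List.foldl_append,
      List.foldl_cons, List.foldl_nil]
    have hR : ((PySem.List.pyRange 0 (m : Int)).foldl
        (fun T' j => PySem.List.pySetD T' j (PySem.List.pyGetD T' j [] ++
          [PySem.List.pyGetD row j ""])) T).length = T.length :=
      foldl_pySetD_len _ (fun _ j => j)
        (fun T' j => PySem.List.pyGetD T' j [] ++ [PySem.List.pyGetD row j ""]) T
    rw [PySem.List.pyGetD_pySetD_natCast _ m q _ _ (by omega)]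
    by_cases hq : q = m
    · subst hq
      rw [if_pos rfl, ih (by omega), if_neg (by omega), if_pos (by omega)]
    · rw [if_neg hq, ih (by omega)]
      by_cases hlt : q < m
      · rw [if_pos hlt, if_pos (by omega)]
      · rw [if_neg hlt, if_neg (by omega)]

theorem outer_len (rows : List (List String)) (m : Nat) (T : List (List String)) :
    (rows.foldl (fun T row => (PySem.List.pyRange 0 (m : Int)).foldl
      (fun T' j => PySem.List.pySetD T' j (PySem.List.pyGetD T' j [] ++
        [PySem.List.pyGetD row j ""])) T) T).length = T.length := by
  induction rows generalizing T with
  | nil => rfl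
  | cons row rest ih =>
    rw [List.foldl_cons, ih]
    exact foldl_pySetD_len _ (fun _ j => j)
      (fun T' j => PySem.List.pyGetD T' j [] ++ [PySem.List.pyGetD row j ""]) T

theorem outer_getD (rows : List (List String)) (m : Nat) (T : List (List String))
    (hT : T.length = m) (q : Nat) (hq : q < m) :
    PySem.List.pyGetD (rows.foldl (fun T row => (PySem.List.pyRange 0 (m : Int)).foldl
      (fun T' j => PySem.List.pySetD T' j (PySem.List.pyGetD T' j [] ++
        [PySem.List.pyGetD row j ""])) T) T) (q : Int) []
    = PySem.List.pyGetD T (q : Int) [] ++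
        rows.map (fun row => PySem.List.pyGetD row (q : Int) "") := by
  induction rows generalizing T with
  | nil => simp
  | cons row rest ih =>
    rw [List.foldl_cons]
    have hlen : ((PySem.List.pyRange 0 (m : Int)).foldl
        (fun T' j => PySem.List.pySetD T' j (PySem.List.pyGetD T' j [] ++
          [PySem.List.pyGetD row j ""])) T).length = m := by
      rw [foldl_pySetD_len _ (fun _ j => j)
        (fun T' j => PySem.List.pyGetD T' j [] ++ [PySem.List.pyGetD row j ""]) T, hT]
    rw [ih _ hlen, inner_getD row m T (by omega) q, if_pos hq]
    simp

theorem trans_eq (g : List (List String)) (hne : g ≠ []) :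
    pvTransMatrix g = some ((List.range (g.headD []).length).map
      (fun (j : Nat) => g.map (fun row => PySem.List.pyGetD row (j : Int) ""))) := by
  unfold pvTransMatrix
  rw [if_neg (by simp [hne])]
  dsimp only
  have hd : PySem.List.pyGetD g 0 [] = g.headD [] := by
    rw [PySem.List.pyGetD_zero]
    cases g with
    | nil => rfl
    | cons a t => rfl
  congr 1
  have hconv := PySem.List.foldl_pyRange_zero_pyGetD g ([] : List String)
      (fun T row => (PySem.List.pyRange 0 ((PySem.List.pyGetD g 0 []).length : Int)).foldl
        (fun T' j => PySem.List.pySetD T' j (PySem.List.pyGetD T' j [] ++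
          [PySem.List.pyGetD row j ""])) T)
      ((List.range (PySem.List.pyGetD g 0 []).length).map (fun _ => ([] : List String)))
  simp only [PySem.List.len] at hconv
  rw [hconv]
  set cols := (PySem.List.pyGetD g 0 []).length with hcols
  have hinit : ((List.range cols).map (fun _ => ([] : List String))).length = cols := by simp
  apply List.ext_getElem
  · rw [outer_len, hinit]
    simp [hd, hcols]
  · intro q h1 h2
    have hq : q < cols := by
      rw [outer_len, hinit] at h1
      exact h1
    have hgd := outer_getD g cols ((List.range cols).map (fun _ => ([] : List String))) hinit q hq
    have hinit_q : PySem.List.pyGetD ((List.range cols).map (fun _ => ([] : List String))) (q : Int) []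
        = ([] : List String) := by
      rw [PySem.List.pyGetD_eq_getElem _ _ (by omega) (by rw [hinit]; exact_mod_cast hq)]
      simp
    rw [hinit_q, List.nil_append] at hgd
    have hL := PySem.List.pyGetD_eq_getElem (d := ([] : List String))
      (xs := g.foldl (fun T row => (PySem.List.pyRange 0 (cols : Int)).foldl
        (fun T' j => PySem.List.pySetD T' j (PySem.List.pyGetD T' j [] ++
          [PySem.List.pyGetD row j ""])) T) ((List.range cols).map (fun _ => ([] : List String))))
      (i := (q : Int)) (by omega) (by rw [outer_len, hinit]; exact_mod_cast hq)
    simp only [Int.toNat_natCast] at hL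
    rw [← hL, hgd]
    simp

theorem map_findSome?_out {α β γ : Type} (l : List α) (f : α → Option β) (h : β → γ) :
    (l.findSome? f).map h = l.findSome? (fun x => (f x).map h) := by
  induction l with
  | nil => rfl
  | cons a t ih =>
    simp only [List.findSome?_cons]
    cases f a with
    | none => simpa using ih
    | some b => rfl

theorem findSome?_congr {α β : Type} {l : List α} {f g : α → Option β}
    (h : ∀ x ∈ l, f x = g x) : l.findSome? f = l.findSome? g := by
  induction l with
  | nil => rfl
  | cons a t ih =>
    simp only [List.findSome?_cons, h a (by simp)]
    cases g a with
    | none => exact ih (fun x hx => h x (by simp [hx]))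
    | some b => rfl

theorem pyGetD_col (g : List (List String)) (j x : Int) :
    PySem.List.pyGetD (g.map (fun row => PySem.List.pyGetD row j "")) x ""
      = PySem.List.pyGetD (PySem.List.pyGetD g x []) j "" := by
  have hnil : PySem.List.pyGetD ([] : List String) j "" = "" := by
    simp [PySem.List.pyGetD, PySem.List.pyGet?]
  have h := PySem.List.pyGetD_map (fun row => PySem.List.pyGetD row j "") g x []
  rw [hnil] at h
  exact h

theorem matchHV (g : List (List String)) (chars : List Char) (j r : Int) :
    altMatchH (g.map (fun row => PySem.List.pyGetD row j "")) chars r = altMatchV g chars r j := by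
  unfold altMatchH altMatchV
  simp only [pyGetD_col]

theorem fwv_eq (g : List (List String)) (word : String) (hne : g ≠ [])
    (hrect : ∀ row ∈ g, row.length = (g.headD []).length)
    (hcell : ∀ row ∈ g, ∀ cell ∈ row, cell.toList.length = 1) :
    pvFWV g word = altFindV g word.toList := by
  obtain ⟨r0, grest, rfl⟩ : ∃ r0 grest, g = r0 :: grest := by
    cases g with
    | nil => exact absurd rfl hne
    | cons a t => exact ⟨a, t, rfl⟩
  set g := r0 :: grest with hg
  unfold pvFWV
  rw [trans_eq g hne]
  set cols := (g.headD []).length with hcols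
  set T := (List.range cols).map
    (fun (j : Nat) => g.map (fun row => PySem.List.pyGetD row (j : Int) "")) with hT
  have hTlen : T.length = cols := by rw [hT]; simp
  have hTcell : ∀ row ∈ T, ∀ cell ∈ row, cell.toList.length = 1 := by
    intro row hrow cell hcellmem
    rw [hT] at hrow
    simp only [List.mem_map, List.mem_range] at hrow
    obtain ⟨j, hj, rfl⟩ := hrow
    simp only [List.mem_map] at hcellmem
    obtain ⟨grow, hgrow, rfl⟩ := hcellmem
    have hjlen : j < grow.length := by rw [hrect grow hgrow]; exact hj
    rw [PySem.List.pyGetD_eq_getElem grow "" (by omega) (by exact_mod_cast hjlen)]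
    exact hcell grow hgrow _ (List.getElem_mem _)
  show (match pvFWH T word 0 with
        | none => none
        | some a => some (a.2, a.1)) = altFindV g word.toList
  rw [fwh_eq T word hTcell 0]
  rw [PySem.List.enumerate_eq_map_pyRange T []]
  rw [List.findSome?_map]
  have hlenT : PySem.List.len T = (cols : Int) := by
    simp [PySem.List.len, hTlen]
  rw [hlenT]
  have hA : ((PySem.List.pyRange 0 (cols : Int)).findSome?
        ((fun rc => ((PySem.List.pyRange 0 ((rc.2.length : Int) - word.toList.length + 1)).find?
            (fun c => altMatchH rc.2 word.toList c)).map (fun c => (rc.1, c)))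
          ∘ (fun j => (j, PySem.List.pyGetD T j [])))).map (fun a => (a.2, a.1))
      = (PySem.List.pyRange 0 (cols : Int)).findSome? (fun c =>
          ((PySem.List.pyRange 0 ((g.length : Int) - word.toList.length + 1)).find?
            (fun r => altMatchV g word.toList r c)).map (fun r => (r, c))) := by
    rw [map_findSome?_out]
    apply findSome?_congr
    intro j hj
    rw [PySem.List.mem_pyRange_one] at hj
    have hTj : PySem.List.pyGetD T j [] = g.map (fun row => PySem.List.pyGetD row j "") := by
      rw [PySem.List.pyGetD_eq_getElem T [] hj.1 (by rw [hTlen]; omega)]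
      simp only [hT, List.getElem_map, List.getElem_range]
      rw [Int.toNat_of_nonneg hj.1]
    simp only [Function.comp, hTj, List.length_map]
    rw [Option.map_map]
    congr 1
    · congr 1
      funext r
      exact matchHV g word.toList j r
  have hmatch : ∀ (X : Option (Int × Int)),
      (match X with | none => none | some a => some (a.2, a.1)) = X.map (fun a => (a.2, a.1)) := by
    intro X; cases X <;> rfl
  have hBdef : altFindV g word.toList
      = (PySem.List.pyRange 0 (cols : Int)).findSome? (fun c =>
          ((PySem.List.pyRange 0 ((g.length : Int) - word.toList.length + 1)).find?
            (fun r => altMatchV g word.toList r c)).map (fun r => (r, c))) := rfl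
  rw [hmatch, hBdef, ← hA]

theorem flatMap_eq_of_cells {seg : List String} {w : List Char} (hlen : seg.length = w.length)
    (h : ∀ i (hi : i < seg.length) (hw : i < w.length), seg[i].toList = [w[i]]) :
    seg.flatMap String.toList = w := by
  induction seg generalizing w with
  | nil =>
    cases w with
    | nil => rfl
    | cons ch wt => simp at hlen
  | cons a t ih =>
    cases w with
    | nil => simp at hlen
    | cons ch wt =>
      have h0 := h 0 (by simp) (by simp)
      simp only [List.getElem_cons_zero] at h0
      simp only [List.flatMap_cons, h0, List.cons_append, List.nil_append, List.cons.injEq,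
        true_and]
      exact ih (by simpa using hlen)
        (fun i hi hw => by simpa using h (i + 1) (by simpa using hi) (by simpa using hw))

theorem altMatchH_infix {row : List String} {w : List Char} {c : Int}
    (h0 : 0 ≤ c) (hcl : c.toNat + w.length ≤ row.length) (hm : altMatchH row w c = true) :
    w <:+: row.flatMap String.toList := by
  unfold altMatchH at hm
  rw [List.all_eq_true] at hm
  have hpt : ∀ i (hi : i < w.length), (row[c.toNat + i]'(by omega)).toList = [w[i]] := by
    intro i hi
    have hmem : ((i : Nat) : Int) ∈ PySem.List.pyRange 0 (w.length : Int) :=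
      PySem.List.mem_pyRange_one.mpr (by omega)
    have h := hm _ hmem
    simp only [decide_eq_true_eq] at h
    rw [PySem.List.pyGetD_eq_getElem row "" (by omega) (by omega),
        PySem.List.pyGetD_eq_getElem w ' ' (by omega) (by omega)] at h
    simpa [show ((c + (i : Int)).toNat) = c.toNat + i by omega, Int.toNat_natCast] using h
  have hseg : ((row.drop c.toNat).take w.length).flatMap String.toList = w := by
    apply flatMap_eq_of_cells
    · rw [List.length_take, List.length_drop]; omega
    · intro i hi hw
      have : ((row.drop c.toNat).take w.length)[i] = row[c.toNat + i]'(by omega) := by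
        simp [List.getElem_take, List.getElem_drop]
      rw [this]
      exact hpt i hw
  refine ⟨(row.take c.toNat).flatMap String.toList,
    (row.drop (c.toNat + w.length)).flatMap String.toList, ?_⟩
  have hdecomp : row = row.take c.toNat ++ (row.drop c.toNat).take w.length ++
      row.drop (c.toNat + w.length) := by
    rw [← List.drop_drop ..]
    rw [List.append_assoc, List.take_append_drop, List.take_append_drop]
  conv_rhs => rw [hdecomp, List.flatMap_append, List.flatMap_append, hseg]

theorem pvFWH_none {g : List (List String)} {word : String}
    (h : ∀ row ∈ g, PySem.Chars.find (csOf row) word.toList = -1) (r : Int) :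
    pvFWH g word r = none := by
  induction g generalizing r with
  | nil => rfl
  | cons row rest ih =>
    show (if PySem.Str.find (pvRowStr row) word ≠ -1
          then some (r, PySem.Str.find (pvRowStr row) word)
          else pvFWH rest word (r + 1)) = none
    rw [PySem.Str.find_eq, toList_pvRowStr, h row (by simp), if_neg (by simp)]
    exact ih (fun row hr => h row (by simp [hr])) (r + 1)

theorem altFindH_none {g : List (List String)} {w : List Char}
    (h : ∀ row ∈ g, ¬ w <:+: row.flatMap String.toList) : altFindH g w = none := by
  unfold altFindH
  rw [List.findSome?_eq_none_iff]
  intro rc hrc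
  have hmem : rc.2 ∈ g := by
    rw [PySem.List.mem_enumerate_iff] at hrc
    obtain ⟨k, hk, rfl⟩ := hrc
    exact List.getElem_mem hk
  rw [Option.map_eq_none_iff]
  apply List.find?_eq_none.mpr
  intro c hc
  rw [PySem.List.mem_pyRange_one] at hc
  by_contra hC
  exact h rc.2 hmem (altMatchH_infix hc.1 (by omega) hC)

-- ===== VERDICT (by name: the statement is the Claim_ definition above) =====
theorem capitalize_word_in_crossword_spec : Claim_equal_capitalize_word_in_crossword := by
  unfold Claim_equal_capitalize_word_in_crossword
  intro g word _ hpre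
  unfold Spec_capitalize_word_in_crossword
  unfold capitalize_word_in_crossword capitalize_word_in_crossword_alt
  have hlen : (PySem.Str.len word).toNat = word.toList.length := by
    rw [PySem.Str.len_eq]; simp
  rcases hpre with ⟨hne, hw⟩ | ⟨hne, hrect, hcell⟩ | ⟨hne, hwne, hlong, hnoH, hnoV⟩
  · -- empty word: both match at the top-left and change nothing
    obtain ⟨r0, grest, rfl⟩ : ∃ r0 grest, g = r0 :: grest := by
      cases g with
      | nil => exact absurd rfl hne
      | cons a t => exact ⟨a, t, rfl⟩
    have hA : pvFWH (r0 :: grest) word 0 = some (0, 0) := by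
      show (if PySem.Str.find (pvRowStr r0) word ≠ -1
            then some ((0 : Int), PySem.Str.find (pvRowStr r0) word)
            else pvFWH grest word (0 + 1)) = some (0, 0)
      rw [PySem.Str.find_eq, toList_pvRowStr, hw, PySem.Chars.find_nil]
      simp
    have hB : altFindH (r0 :: grest) word.toList = some (0, 0) := by
      unfold altFindH
      rw [PySem.List.enumerate_cons]
      simp only [List.findSome?_cons, hw]
      have hfirst : (PySem.List.pyRange 0 ((r0.length : Int) - ([] : List Char).length + 1)).find?
          (fun c => altMatchH r0 [] c) = some 0 := by
        have hcons : PySem.List.pyRange 0 ((r0.length : Int) - ([] : List Char).length + 1)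
            = 0 :: PySem.List.pyRange (0 + 1) ((r0.length : Int) - ([] : List Char).length + 1) :=
          PySem.List.pyRange_one_cons (by simp)
        rw [hcons, List.find?_cons_of_pos (by unfold altMatchH; rfl)]
      rw [hfirst]
      rfl
    rw [hw] at hB
    simp only [hA, hB, hlen, hw, List.length_nil]
  · -- single-character rectangular grid: the two searches coincide exactly
    have hH : pvFWH g word 0 = altFindH g word.toList := by
      rw [fwh_eq g word hcell 0]; rfl
    have hV := fwv_eq g word hne hrect hcell
    simp only [hH, hV, hlen]
  · -- the word occurs nowhere: both return the grid unchanged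
    have hAH : pvFWH g word 0 = none := by
      apply pvFWH_none
      intro row hrow
      exact (PySem.Chars.find_eq_neg_one_iff _ _).mpr (hnoH row hrow)
    have hBH : altFindH g word.toList = none := altFindH_none hnoH
    obtain ⟨r0, grest, rfl⟩ : ∃ r0 grest, g = r0 :: grest := by
      cases g with
      | nil => exact absurd rfl hne
      | cons a t => exact ⟨a, t, rfl⟩
    set g := r0 :: grest with hg
    have hAV : pvFWV g word = none := by
      unfold pvFWV
      rw [trans_eq g hne]
      show (match pvFWH ((List.range (g.headD []).length).map
            (fun (j : Nat) => g.map (fun row => PySem.List.pyGetD row (j : Int) ""))) word 0 with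
          | none => none
          | some a => some (a.2, a.1)) = none
      rw [pvFWH_none ?_ 0]
      intro row hrow
      simp only [List.mem_map, List.mem_range] at hrow
      obtain ⟨j, hj, rfl⟩ := hrow
      exact (PySem.Chars.find_eq_neg_one_iff _ _).mpr (hnoV j hj)
    have hBV : altFindV g word.toList = none := by
      have hBdef : altFindV g word.toList
          = (PySem.List.pyRange 0 (((g.headD []).length : Int))).findSome? (fun c =>
              ((PySem.List.pyRange 0 ((g.length : Int) - word.toList.length + 1)).find?
                (fun r => altMatchV g word.toList r c)).map (fun r => (r, c))) := rfl
      rw [hBdef, List.findSome?_eq_none_iff]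
      intro c hc
      rw [PySem.List.mem_pyRange_one] at hc
      rw [Option.map_eq_none_iff]
      apply List.find?_eq_none.mpr
      intro r hr
      rw [PySem.List.mem_pyRange_one] at hr
      by_contra hC
      rw [← matchHV g word.toList c r] at hC
      have hinf := altMatchH_infix hr.1 (by simp only [List.length_map]; omega) hC
      have hcnat : ((c.toNat : Nat) : Int) = c := Int.toNat_of_nonneg hc.1
      rw [← hcnat] at hinf
      exact hnoV c.toNat (by omega) hinf
    simp only [hAH, hAV, hBH, hBV]
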